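-- pv_equiv track=rewrite | github.com/javadebadi/web-scraping | test.py | convert_str_to_int
-- ===== SOURCE A (Python) =====
-- def convert_str_to_int(text = ""):
--     """convert string to number, when the int() function does not work
--     Some numbers in the website are like 3,589 which will not be converted
--     to 3589 when using int() to the string. This function will help to do
--     that.
--
--     Args:
--         text (str): a string of number
--
--     Returns:
--         number (int)
--
--     Example:
--         >>> convert_str_to_int(58)
--         58
--         >>> convert_str_to_int(3,597)
--         3597
--         >>> convert_str_to_int(1,000,000)
--         1000000
--     """
--     l = list(reversed(text.split(",")))
--     number = 0
--     if len(l) == 0: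
--         return 0
--     for i in range(len(l)):
--         number += (10**(3*i))*int(l[i]) # the numbers were splitted to 3 digits
--     return number
-- ===== SOURCE B (Python) =====
-- def convert_str_to_int(text = ""):
--     number = 0
--     for group in text.split(","):
--         number = number * 1000 + int(group)
--     return number
-- ===== Notes on version B (the rewrite author's own statement) =====
-- stated objective: simpler
-- what changed: Horner accumulation over the groups in left-to-right order (number = number*1000 + int(group)) replaces reversing the split list and summing index-based powers 10**(3*i).
import Mathlib
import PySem

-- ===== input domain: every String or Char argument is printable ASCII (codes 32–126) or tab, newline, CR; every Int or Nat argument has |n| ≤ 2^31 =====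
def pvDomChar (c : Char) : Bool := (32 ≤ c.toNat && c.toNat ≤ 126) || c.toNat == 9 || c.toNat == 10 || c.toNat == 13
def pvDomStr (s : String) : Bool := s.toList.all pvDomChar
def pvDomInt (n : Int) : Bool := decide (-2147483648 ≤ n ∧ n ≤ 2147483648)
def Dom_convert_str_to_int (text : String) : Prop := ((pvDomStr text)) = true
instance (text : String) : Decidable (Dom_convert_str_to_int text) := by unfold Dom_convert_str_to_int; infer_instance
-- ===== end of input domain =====

-- B replaces A's reverse-then-sum-of-powers (10**(3*i)) with a left-to-right Horner accumulation; objective: simpler.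

-- ===== PORT A =====
-- text.split(","): sep "," is nonempty, so PySem.Str.split? always returns some; .getD [] is exact.
def convert_str_to_int (text : String) : Int :=
  let l := ((PySem.Str.split? text ",").getD []).reverse
  if PySem.List.len l = 0 then 0
  else
    (PySem.List.pyRange 0 (PySem.List.len l) 1).foldl
      (fun number i =>
        number + (10 : Int) ^ ((3 * i).toNat) * (PySem.Int.ofStr? (PySem.List.pyGetD l i "")).getD 0) 0

-- ===== PORT B =====
def convert_str_to_int_alt (text : String) : Int :=
  ((PySem.Str.split? text ",").getD []).foldl
    (fun number group => number * 1000 + (PySem.Int.ofStr? group).getD 0) 0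

-- ===== PRECONDITION & SPEC =====
-- Pre_ excludes exactly the inputs where Python's int() raises ValueError on some comma-group (e.g. "", "1,,2", "abc").
def Pre_convert_str_to_int (text : String) : Prop :=
  ∀ g ∈ (PySem.Str.split? text ",").getD [], (PySem.Int.ofStr? g).isSome = true
instance (text : String) : Decidable (Pre_convert_str_to_int text) := by
  unfold Pre_convert_str_to_int; infer_instance
def pvWitness_convert_str_to_int : String := "1,234"

def Spec_convert_str_to_int (text : String) (out : Int) : Prop := out = convert_str_to_int_alt text
instance (text : String) (out : Int) : Decidable (Spec_convert_str_to_int text out) := by unfold Spec_convert_str_to_int; infer_instance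

-- ===== CLAIM (what is proved, stated in full; the proofs are below) =====
def Claim_equal_convert_str_to_int : Prop := ∀ (text : String), Dom_convert_str_to_int text → Pre_convert_str_to_int text → Spec_convert_str_to_int text (convert_str_to_int text)

-- ===== LEMMAS AND PROOFS =====

-- A's indexed sum over a list l, as a foldr over l.
lemma pv_sumPow (v : String → Int) (l : List String) :
    (PySem.List.pyRange 0 (PySem.List.len l) 1).foldl
      (fun n i => n + (10 : Int) ^ ((3 * i).toNat) * v (PySem.List.pyGetD l i "")) 0
    = l.foldr (fun g n => v g + 1000 * n) 0 := by
  rw [PySem.List.len_eq, PySem.List.pyRange_zero_natCast, List.foldl_map]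
  simp only [PySem.List.pyGetD_natCast,
    show ∀ k : ℕ, ((3 * (k : ℤ)).toNat) = 3 * k from fun k => by omega]
  rw [PySem.List.foldl_add]
  induction l with
  | nil => simp
  | cons x xs ih =>
    simp only [List.length_cons, List.range_succ_eq_map, List.map_cons, List.map_map,
      List.sum_cons] at *
    have hcomp : ((fun k => (10:ℤ) ^ (3 * k) * v ((x :: xs).getD k "")) ∘ Nat.succ)
        = fun k => 1000 * ((10:ℤ) ^ (3 * k) * v (xs.getD k "")) := by
      funext k
      simp [Function.comp, pow_succ, Nat.succ_eq_add_one, Nat.mul_add]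
      ring
    rw [hcomp, List.sum_map_mul_left]
    simp [List.foldr_cons] at ih ⊢
    rw [← ih]

-- foldr over the reversed list is A's traversal; Horner's foldl body is the same map up to commutativity.
lemma pv_key (v : String → Int) (gs : List String) :
    gs.reverse.foldr (fun g n => v g + 1000 * n) 0
    = gs.foldl (fun n g => n * 1000 + v g) 0 := by
  rw [List.foldr_reverse]
  congr 1
  funext n g
  ring

-- ===== VERDICT (by name: the statement is the Claim_ definition above) =====
theorem convert_str_to_int_spec : Claim_equal_convert_str_to_int := by
  intro text _ _
  unfold Spec_convert_str_to_int convert_str_to_int convert_str_to_int_alt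
  set gs := (PySem.Str.split? text ",").getD [] with hgs
  dsimp only
  rw [pv_sumPow (fun g => (PySem.Int.ofStr? g).getD 0) gs.reverse,
      pv_key (fun g => (PySem.Int.ofStr? g).getD 0) gs]
  split_ifs with h
  · have h1 : gs.reverse = [] := by
      simpa [PySem.List.len_eq] using h
    have h2 : gs = [] := by simpa using congrArg List.reverse h1
    simp [h2]
  · rfl
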